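-- pv_equiv track=rewrite | github.com/JohannesTimmreck/Tek5_AlgoGraph | task1/parcours.py | __clusterSides
-- ===== SOURCE A (Python) =====
-- def __clusterSides(subList: list, maxDistance: int, left: bool) -> list:
--     cluster = []
--     for house in subList:
--         if not cluster:
--             cluster.append([house])
--         elif(left == False and (cluster[-1][-1] + maxDistance) >= house
--             or left == True and (cluster[-1][-1] - maxDistance) <= house):
--             cluster[-1].append(house)
--         else:
--             cluster.append([house])
--     return cluster
-- ===== SOURCE B (Python) =====
-- def __clusterSides(subList: list, maxDistance: int, left: bool) -> list:
--     out = []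
--     cur = []  # open cluster, collected back-to-front (stored reversed)
--     for house in reversed(subList):
--         if cur and not ((house - maxDistance <= cur[-1]) if left else (house + maxDistance >= cur[-1])):
--             out.append(cur[::-1])
--             cur = []
--         cur.append(house)
--     if cur:
--         out.append(cur[::-1])
--     out.reverse()
--     return out
-- ===== Notes on version B (the rewrite author's own statement) =====
-- stated objective: alternative
-- what changed: B builds the clustering back-to-front: one pass over reversed(subList) with a flush accumulator (open cluster kept reversed, flushed on a break), then a final reverse, instead of A's forward pass that appends to the last cluster while peeking at its last element.
import Mathlib
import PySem

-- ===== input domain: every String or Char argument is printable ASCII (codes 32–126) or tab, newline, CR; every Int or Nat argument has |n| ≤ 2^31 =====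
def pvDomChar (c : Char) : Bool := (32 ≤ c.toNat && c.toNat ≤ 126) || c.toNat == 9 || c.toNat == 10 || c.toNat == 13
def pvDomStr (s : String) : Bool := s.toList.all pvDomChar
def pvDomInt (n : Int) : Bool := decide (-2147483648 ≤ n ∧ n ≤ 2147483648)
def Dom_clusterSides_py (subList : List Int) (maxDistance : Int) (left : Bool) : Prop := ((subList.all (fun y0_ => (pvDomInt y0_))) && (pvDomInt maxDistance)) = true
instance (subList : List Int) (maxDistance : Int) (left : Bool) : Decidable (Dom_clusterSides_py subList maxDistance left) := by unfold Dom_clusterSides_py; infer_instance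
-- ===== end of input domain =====

-- B makes one reversed pass with a flush accumulator (open cluster kept reversed), then one
-- final reverse, instead of A's forward pass appending to the last cluster; alternative decomposition.

-- ===== PORT A =====
-- one loop step of A: cluster[-1][-1] is cluster.getLast!.getLast!, cluster[-1].append(house)
-- is dropLast ++ [last ++ [house]]; branch order and the precedence-reduced condition kept as in A
def pvStepA (maxDistance : Int) (left : Bool) (cluster : List (List Int)) (house : Int) : List (List Int) :=
  match cluster.getLast? with
  | none => cluster ++ [[house]]                 -- if not cluster
  | some last =>
      if ((left == false) && decide (last.getLast! + maxDistance ≥ house))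
         || ((left == true) && decide (last.getLast! - maxDistance ≤ house))
      then cluster.dropLast ++ [last ++ [house]]
      else cluster ++ [[house]]

def clusterSides_py (subList : List Int) (maxDistance : Int) (left : Bool) : List (List Int) :=
  subList.foldl (pvStepA maxDistance left) []

-- ===== PORT B =====
-- B's adjacency test: (house - maxDistance <= cur[-1]) if left else (house + maxDistance >= cur[-1])
def pvCond (maxDistance : Int) (left : Bool) (house top : Int) : Bool :=
  if left then decide (house - maxDistance ≤ top) else decide (house + maxDistance ≥ top)

-- one loop step of B (over reversed(subList)); state = (out, cur): flush cur on a break, then append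
def pvStepN (maxDistance : Int) (left : Bool) (s : List (List Int) × List Int) (house : Int) :
    List (List Int) × List Int :=
  let s' := if s.2 ≠ [] ∧ pvCond maxDistance left house s.2.getLast! = false
            then (s.1 ++ [s.2.reverse], ([] : List Int)) else s
  (s'.1, s'.2 ++ [house])

-- after the loop: if cur: out.append(cur[::-1]); out.reverse()
def pvFinishN (s : List (List Int) × List Int) : List (List Int) :=
  (if s.2 ≠ [] then s.1 ++ [s.2.reverse] else s.1).reverse

def clusterSides_py_alt (subList : List Int) (maxDistance : Int) (left : Bool) : List (List Int) :=
  pvFinishN (subList.reverse.foldl (pvStepN maxDistance left) ([], []))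

-- ===== PRECONDITION & SPEC =====
def Spec_clusterSides_py (subList : List Int) (maxDistance : Int) (left : Bool) (out : List (List Int)) : Prop := out = clusterSides_py_alt subList maxDistance left
instance (subList : List Int) (maxDistance : Int) (left : Bool) (out : List (List Int)) : Decidable (Spec_clusterSides_py subList maxDistance left out) := by unfold Spec_clusterSides_py; infer_instance

-- ===== CLAIM (what is proved, stated in full; the proofs are below) =====
def Claim_equal_clusterSides_py : Prop := ∀ (subList : List Int) (maxDistance : Int) (left : Bool), Dom_clusterSides_py subList maxDistance left → Spec_clusterSides_py subList maxDistance left (clusterSides_py subList maxDistance left)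

-- ===== LEMMAS AND PROOFS =====

theorem pvGetLast!_singleton (a : Int) : ([a] : List Int).getLast! = a := rfl

theorem pvGetLast!_concat (l : List Int) (a : Int) : (l ++ [a]).getLast! = a := by simp

theorem pvHead!_reverse (l : List Int) : l.reverse.head! = l.getLast! := by
  simp [List.head!_eq_head?_getD, List.getLast!_eq_getLast?_getD, List.head?_reverse]

theorem pvCondA_eq (maxDistance p h : Int) (left : Bool) :
    (((left == false) && decide (p + maxDistance ≥ h))
      || ((left == true) && decide (p - maxDistance ≤ h))) = pvCond maxDistance left p h := by
  cases left <;> simp [pvCond]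

-- common reference: the right-to-left grouping step (B's clustering as one fold state)
def pvStepB (maxDistance : Int) (left : Bool) (house : Int) (cluster : List (List Int)) : List (List Int) :=
  match cluster with
  | [] => [[house]]
  | g :: gs =>
      if pvCond maxDistance left house g.head!
      then (house :: g) :: gs
      else [house] :: g :: gs

-- how an open (necessarily last) cluster g is merged into the reference clustering of the rest
def pvMerge (maxDistance : Int) (left : Bool) (g : List Int) (r : List (List Int)) : List (List Int) :=
  match r with
  | [] => [g]
  | h :: t => if pvCond maxDistance left g.getLast! h.head! then (g ++ h) :: t else g :: h :: t

theorem pvStepA_concat (d : Int) (l : Bool) (c : List (List Int)) (g : List Int) (y : Int) :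
    pvStepA d l (c ++ [g]) y =
      if pvCond d l g.getLast! y then c ++ [g ++ [y]] else (c ++ [g]) ++ [[y]] := by
  simp only [pvStepA, List.getLast?_concat, List.dropLast_concat, pvCondA_eq]

theorem pvFoldA_eq_merge (d : Int) (l : Bool) :
    ∀ (xs : List Int) (c : List (List Int)) (g : List Int),
      List.foldl (pvStepA d l) (c ++ [g]) xs
        = c ++ pvMerge d l g (List.foldr (pvStepB d l) [] xs) := by
  intro xs
  induction xs with
  | nil => intro c g; simp [pvMerge]
  | cons y ys ih =>
    intro c g
    rw [List.foldl_cons, pvStepA_concat, List.foldr_cons]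
    by_cases hc : pvCond d l g.getLast! y = true
    · rw [if_pos hc, ih c (g ++ [y])]
      congr 1
      cases hR : List.foldr (pvStepB d l) [] ys with
      | nil =>
        show [g ++ [y]] = pvMerge d l g [[y]]
        simp only [pvMerge, List.head!_cons, if_pos hc]
      | cons h t =>
        by_cases hy : pvCond d l y h.head! = true
        · show pvMerge d l (g ++ [y]) (h :: t) = pvMerge d l g (pvStepB d l y (h :: t))
          simp only [pvStepB, if_pos hy, pvMerge, pvGetLast!_concat, List.head!_cons,
            if_pos hc, List.append_assoc, List.singleton_append]
        · show pvMerge d l (g ++ [y]) (h :: t) = pvMerge d l g (pvStepB d l y (h :: t))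
          simp only [pvStepB, pvMerge, pvGetLast!_concat, List.head!_cons,
            if_pos hc, if_neg hy]
    · rw [if_neg hc, ih (c ++ [g]) [y], List.append_assoc, List.singleton_append]
      congr 1
      cases hR : List.foldr (pvStepB d l) [] ys with
      | nil =>
        show g :: pvMerge d l [y] [] = pvMerge d l g [[y]]
        simp only [pvMerge, List.head!_cons, if_neg hc]
      | cons h t =>
        by_cases hy : pvCond d l y h.head! = true
        · show g :: pvMerge d l [y] (h :: t) = pvMerge d l g (pvStepB d l y (h :: t))
          simp only [pvStepB, if_pos hy, pvMerge, List.head!_cons, if_neg hc,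
            pvGetLast!_singleton, List.singleton_append]
        · show g :: pvMerge d l [y] (h :: t) = pvMerge d l g (pvStepB d l y (h :: t))
          simp only [pvStepB, if_neg hy, pvMerge, List.head!_cons, if_neg hc,
            pvGetLast!_singleton]

theorem pvMerge_singleton (d : Int) (l : Bool) (x : Int) (r : List (List Int)) :
    pvMerge d l [x] r = pvStepB d l x r := by
  cases r with
  | nil => rfl
  | cons h t =>
    simp only [pvMerge, pvStepB, pvGetLast!_singleton, List.singleton_append]

-- A equals the reference clustering
theorem pvA_eq_foldrB (subList : List Int) (d : Int) (l : Bool) :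
    clusterSides_py subList d l = List.foldr (pvStepB d l) [] subList := by
  unfold clusterSides_py
  cases subList with
  | nil => rfl
  | cons x xs =>
    rw [List.foldl_cons]
    have h0 : pvStepA d l [] x = [] ++ [[x]] := rfl
    rw [h0, pvFoldA_eq_merge, List.foldr_cons, pvMerge_singleton]
    rfl

-- B's loop invariant: (out, cur) with cur open and nonempty is the reference state cur.reverse :: out.reverse
theorem pvFoldN_eq_foldrB (d : Int) (l : Bool) :
    ∀ (r : List Int) (out : List (List Int)) (cur : List Int), cur ≠ [] →
      pvFinishN (List.foldl (pvStepN d l) (out, cur) r)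
        = List.foldl (fun C house => pvStepB d l house C) (cur.reverse :: out.reverse) r := by
  intro r
  induction r with
  | nil =>
    intro out cur h
    simp [pvFinishN, h]
  | cons y ys ih =>
    intro out cur h
    rw [List.foldl_cons, List.foldl_cons]
    by_cases hc : pvCond d l y cur.getLast! = true
    · have hcn := hc
      simp only [List.getLast!_eq_getLast?_getD, Int.default_eq_zero] at hcn
      have hN : pvStepN d l (out, cur) y = (out, cur ++ [y]) := by
        simp [pvStepN, hcn]
      have hB : pvStepB d l y (cur.reverse :: out.reverse) = (y :: cur.reverse) :: out.reverse := by
        simp only [pvStepB, pvHead!_reverse, if_pos hc]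
      rw [hN, hB, ih out (cur ++ [y]) (by simp)]
      simp
    · have hc' : pvCond d l y cur.getLast! = false := by
        cases hcc : pvCond d l y cur.getLast! <;> simp_all
      have hcn := hc'
      simp only [List.getLast!_eq_getLast?_getD, Int.default_eq_zero] at hcn
      have hN : pvStepN d l (out, cur) y = (out ++ [cur.reverse], [y]) := by
        simp [pvStepN, h, hcn]
      have hB : pvStepB d l y (cur.reverse :: out.reverse)
          = [y] :: cur.reverse :: out.reverse := by
        simp only [pvStepB, pvHead!_reverse]
        rw [if_neg (by simp [hcn])]
      rw [hN, hB, ih (out ++ [cur.reverse]) [y] (by simp)]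
      simp

-- B equals the reference clustering
theorem pvB_eq_foldrB (subList : List Int) (d : Int) (l : Bool) :
    clusterSides_py_alt subList d l = List.foldr (pvStepB d l) [] subList := by
  unfold clusterSides_py_alt
  rw [List.foldr_eq_foldl_reverse]
  cases hr : subList.reverse with
  | nil => rfl
  | cons y r =>
    rw [List.foldl_cons, List.foldl_cons]
    have hN : pvStepN d l ([], []) y = ([], [y]) := rfl
    have hB : pvStepB d l y [] = [[y]] := rfl
    rw [hN, hB, pvFoldN_eq_foldrB d l r [] [y] (by simp)]
    rfl

-- ===== VERDICT (by name: the statement is the Claim_ definition above) =====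
theorem clusterSides_py_spec : Claim_equal_clusterSides_py := by
  intro subList maxDistance left _
  unfold Spec_clusterSides_py
  rw [pvA_eq_foldrB, pvB_eq_foldrB]
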